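-- pv_equiv track=rewrite | github.com/yyangdaa/codeforces | minMex.py | maxMex
-- ===== SOURCE A (Python) =====
-- from collections import Counter
--
-- def canDo(x, arr, k):
--     if x == 0:
--         return True
--     parts = 0
--     seen = [0] * x
--     left = x
--     for num in arr:
--         if num < x and not seen[num]:
--             seen[num] = 1
--             left -= 1
--         if left == 0:
--             parts += 1
--             if parts >= k:
--                 return True
--             seen = [0] * x
--             left = x
--     return False
--
-- def maxMex(arr, k):
--     freq = Counter(arr)
--
--     ptr = 0
--  #
--     # while ptr in freq and freq[ptr] >= k:
--     #     ptr += 1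
-- ##
--     ###
--     while freq[ptr] >= k:
--         ptr += 1
--
--     lo = 0
--     hi = ptr + 1
--
--     while lo < hi:
--         um = (lo + hi) // 2
--         if canDo(um, arr, k):
--             lo = um + 1
--         else:
--             hi = um
--     return lo - 1
-- ===== SOURCE B (Python) =====
-- def canDo(x, arr, k):
--     # Greedy segmentation with a set of distinct values collected so far:
--     # count how many full segments covering {0,..,x-1} fit, then compare with k.
--     if x == 0:
--         return True
--     parts = 0
--     cur = set()
--     for num in arr:
--         if 0 <= num < x and num not in cur:
--             cur.add(num)
--             if len(cur) == x:
--                 parts += 1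
--                 cur = set()
--     return parts >= k
--
-- def maxMex(arr, k):
--     # k segments each covering {0,..,x-1} need at least k*x elements, so the
--     # answer is at most len(arr)//k: scan downward and return the first x that works.
--     for x in range(len(arr) // k, 0, -1):
--         if canDo(x, arr, k):
--             return x
--     return 0
-- ===== Notes on version B (the rewrite author's own statement) =====
-- stated objective: simpler
-- what changed: canDo is rewritten to count all full segments with a set of distinct values (instead of a 0/1 array with a remaining counter and early return), and maxMex drops the Counter/ptr loop and the binary search entirely, scanning x downward from the pigeonhole bound len(arr)//k and returning the first x that works.
-- outside the precondition, e.g. on maxMex([1, 1, 0, 0, -1], 2): A returns 2, B returns 1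
import Mathlib
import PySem

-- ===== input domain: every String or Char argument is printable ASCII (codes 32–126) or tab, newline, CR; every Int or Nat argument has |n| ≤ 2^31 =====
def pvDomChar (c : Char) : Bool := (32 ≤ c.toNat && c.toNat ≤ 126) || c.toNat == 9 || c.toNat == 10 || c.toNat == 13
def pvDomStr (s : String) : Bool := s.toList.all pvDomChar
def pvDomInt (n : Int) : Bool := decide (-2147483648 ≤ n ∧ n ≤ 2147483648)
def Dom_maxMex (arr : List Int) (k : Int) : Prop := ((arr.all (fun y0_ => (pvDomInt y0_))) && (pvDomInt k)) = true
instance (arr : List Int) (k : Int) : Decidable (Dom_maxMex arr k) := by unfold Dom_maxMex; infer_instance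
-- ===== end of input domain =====

-- B rewrites canDo to count ALL full segments with a set of distinct values (A keeps a 0/1
-- array, a remaining counter and early return) and replaces A's Counter/ptr loop + binary
-- search by a downward scan from the pigeonhole bound len(arr)//k (objective: simpler).

-- ===== PORT A =====
-- helper canDo.  Python's `seen[num]` would wrap or raise on a negative num; the `0 ≤ num`
-- guard makes the port exact on Pre_ (whenever canDo is actually reached, all elements are
-- nonnegative).
def canDoLoop (x k : Int) (l : List Int) (parts : Int) (seen : List Int) (left : Int) : Bool :=
  match l with
  | [] => false
  | num :: rest =>
    if 0 ≤ num ∧ num < x ∧ seen.getD num.toNat 0 = 0 then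
      -- marked: seen[num] = 1; left -= 1; then the `if left == 0` check
      if left - 1 = 0 then
        if k ≤ parts + 1 then true
        else canDoLoop x k rest (parts + 1) (List.replicate x.toNat 0) x
      else canDoLoop x k rest parts (seen.set num.toNat 1) (left - 1)
    else
      if left = 0 then
        if k ≤ parts + 1 then true
        else canDoLoop x k rest (parts + 1) (List.replicate x.toNat 0) x
      else canDoLoop x k rest parts seen left

def canDo (x : Int) (arr : List Int) (k : Int) : Bool :=
  if x = 0 then true else canDoLoop x k arr 0 (List.replicate x.toNat 0) x

-- `while freq[ptr] >= k: ptr += 1`; fuel arr.length+1 suffices: with 1 ≤ k (Pre_) the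
-- loop stops at the first value whose count is < k, after at most arr.length successes.
def ptrGo (freq : PySem.Dict Int Int) (k : Int) : Nat → Int → Int
  | 0, ptr => ptr
  | n+1, ptr => if k ≤ freq.getD ptr 0 then ptrGo freq k n (ptr + 1) else ptr

-- `while lo < hi:` binary search; fuel (hi-lo).toNat suffices: the gap shrinks each step.
def bsGo (arr : List Int) (k : Int) : Nat → Int → Int → Int
  | 0, lo, _ => lo
  | n+1, lo, hi =>
    if lo < hi then
      if canDo (PySem.Int.floordiv (lo + hi) 2) arr k then
        bsGo arr k n (PySem.Int.floordiv (lo + hi) 2 + 1) hi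
      else bsGo arr k n lo (PySem.Int.floordiv (lo + hi) 2)
    else lo

def maxMex (arr : List Int) (k : Int) : Int :=
  let freq := PySem.Dict.counter arr
  let ptr := ptrGo freq k (arr.length + 1) 0
  bsGo arr k (ptr + 1).toNat 0 (ptr + 1) - 1

-- ===== PORT B =====
-- B's canDo: fold over arr keeping (parts, cur : set of distinct values of [0,x) in the
-- current segment); a completed segment bumps parts and resets cur; compare parts ≥ k at the end.
def cpLoop (x : Int) : List Int → Int → PySem.Set Int → Int
  | [], parts, _ => parts
  | num :: rest, parts, cur =>
    if 0 ≤ num ∧ num < x ∧ ¬ num ∈ cur then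
      if (((PySem.Set.add cur num).length : Int) = x) then cpLoop x rest (parts + 1) PySem.Set.empty
      else cpLoop x rest parts (PySem.Set.add cur num)
    else cpLoop x rest parts cur

def canDoB (x : Int) (arr : List Int) (k : Int) : Bool :=
  if x = 0 then true else decide (k ≤ cpLoop x arr 0 PySem.Set.empty)

-- `for x in range(len(arr) // k, 0, -1): if canDo(x, arr, k): return x` / `return 0`
def downGo (arr : List Int) (k : Int) : List Int → Int
  | [] => 0
  | x :: rest => if canDoB x arr k then x else downGo arr k rest

def maxMex_alt (arr : List Int) (k : Int) : Int :=
  downGo arr k (PySem.List.pyRange (PySem.Int.floordiv (arr.length : Int) k) 0 (-1))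

-- ===== PRECONDITION & SPEC =====
-- Pre_ excludes k ≤ 0, where A's `while freq[ptr] >= k` loop never terminates, and arrays
-- containing a negative element when 0 occurs at least k times (so canDo is actually probed
-- with x ≥ 1): there Python's `seen[num]` on a negative num raises IndexError or silently
-- wraps to index x+num, an accident of A's implementation (both ports guard `0 ≤ num`, so
-- the second conjunct is needed only for the ports' fidelity to the Pythons, not by the proof).
def Pre_maxMex (arr : List Int) (k : Int) : Prop :=
  1 ≤ k ∧ ((arr.count 0 : Int) < k ∨ ∀ a ∈ arr, 0 ≤ a)
instance (arr : List Int) (k : Int) : Decidable (Pre_maxMex arr k) := by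
  unfold Pre_maxMex; infer_instance

def pvWitness_maxMex : List Int × Int := ([0, 1, 0, 2], 1)

def Spec_maxMex (arr : List Int) (k : Int) (out : Int) : Prop := out = maxMex_alt arr k
instance (arr : List Int) (k : Int) (out : Int) : Decidable (Spec_maxMex arr k out) := by
  unfold Spec_maxMex; infer_instance

-- ===== CLAIM (what is proved, stated in full; the proofs are below) =====
def Claim_equal_maxMex : Prop :=
  ∀ (arr : List Int) (k : Int), Dom_maxMex arr k → Pre_maxMex arr k →
    Spec_maxMex arr k (maxMex arr k)

-- ===== LEMMAS AND PROOFS =====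

lemma getD_set_eval (l : List Int) (n i : Nat) (b : Int) :
    (l.set n b).getD i 0 = if n = i ∧ n < l.length then b else l.getD i 0 := by
  induction l generalizing n i with
  | nil => simp
  | cons a t ihl =>
    cases n with
    | zero =>
      cases i with
      | zero => simp
      | succ i => simp
    | succ n =>
      cases i with
      | zero => simp
      | succ i => simpa [List.getD_cons_succ, Nat.succ_lt_succ_iff] using ihl n i

lemma getD_set_one (l : List Int) (n i : Nat) (h : l.getD i 0 = 1) :
    (l.set n 1).getD i 0 = 1 := by
  rw [getD_set_eval]; split
  · rfl
  · exact h

lemma count_one_set (l : List Int) (n : Nat) (hn : n < l.length) (h0 : l.getD n 0 = 0) :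
    (l.set n 1).count 1 = l.count 1 + 1 := by
  induction l generalizing n with
  | nil => simp at hn
  | cons a t ihl =>
    cases n with
    | zero =>
      have ha : a = 0 := by simpa using h0
      subst ha
      simp
    | succ n =>
      have hn' : n < t.length := by simpa using hn
      have h0' : t.getD n 0 = 0 := by simpa [List.getD_cons_succ] using h0
      simp only [List.set, List.count_cons, ihl n hn' h0']
      omega

lemma ones_count (l : List Int) (_h01 : ∀ e ∈ l, e = 0 ∨ e = 1) :
    l.count 1 = l.length ↔ ∀ i, i < l.length → l.getD i 0 = 1 := by
  constructor
  · intro h i hi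
    have hm : l.getD i 0 ∈ l := by
      rw [List.getD_eq_getElem l 0 hi]; exact List.getElem_mem hi
    exact ((List.count_eq_length).mp h _ hm).symm
  · intro h
    apply (List.count_eq_length).mpr
    intro b hb
    obtain ⟨i, hi, rfl⟩ := List.mem_iff_getElem.mp hb
    have := h i hi
    rw [List.getD_eq_getElem l 0 hi] at this
    exact this.symm

lemma getD_replicate_zero (n i : Nat) : (List.replicate n (0:Int)).getD i 0 = 0 := by
  rcases Nat.lt_or_ge i n with h | h
  · rw [List.getD_eq_getElem _ 0 (by simpa using h)]
    simp
  · rw [List.getD_eq_default _ 0 (by simpa using h)]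

lemma count_replicate_zero (n : Nat) : (List.replicate n (0:Int)).count 1 = 0 := by
  simp [List.count_replicate]

-- the coupling invariant: a y-greedy run dominates an x-greedy run for y ≤ x
lemma monoLoop (x y k : Int) (hy : 1 ≤ y) (hyx : y ≤ x) :
    ∀ (rest : List Int) (px py : Int) (sx sy : List Int),
      sx.length = x.toNat → sy.length = y.toNat →
      (∀ e ∈ sx, e = 0 ∨ e = 1) → (∀ e ∈ sy, e = 0 ∨ e = 1) →
      py < k →
      (px < py ∨ (px = py ∧ ∀ i : Nat, i < y.toNat → sx.getD i 0 = 1 → sy.getD i 0 = 1)) →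
      canDoLoop x k rest px sx (x - sx.count 1) = true →
      canDoLoop y k rest py sy (y - sy.count 1) = true := by
  intro rest
  induction rest with
  | nil => intro px py sx sy _ _ _ _ _ _ h; simp [canDoLoop] at h
  | cons num rest ih =>
    intro px py sx sy hlx hly h01x h01y hpyk hinv H
    have hx1 : 1 ≤ x := le_trans hy hyx
    have hcmx : sx.count 1 ≤ sx.length := List.count_le_length
    have hcmy : sy.count 1 ≤ sy.length := List.count_le_length
    simp only [canDoLoop] at H ⊢
    by_cases hMx : 0 ≤ num ∧ num < x ∧ sx.getD num.toNat 0 = 0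
    · obtain ⟨hnum0, hnumx, hseenx⟩ := hMx
      have hnx : num.toNat < sx.length := by omega
      have hcset : (sx.set num.toNat 1).count 1 = sx.count 1 + 1 :=
        count_one_set _ _ hnx hseenx
      have h01setx : ∀ e ∈ sx.set num.toNat 1, e = 0 ∨ e = 1 := by
        intro e he
        rcases List.mem_or_eq_of_mem_set he with h | h
        · exact h01x e h
        · exact Or.inr h
      rw [if_pos ⟨hnum0, hnumx, hseenx⟩] at H
      by_cases hcx0 : x - (sx.count 1 : Int) - 1 = 0
      · -- x-run completes a part at this element
        rw [if_pos hcx0] at H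
        have hfull : (sx.set num.toNat 1).count 1 = (sx.set num.toNat 1).length := by
          rw [List.length_set, hcset]; omega
        have hallx : ∀ i, i < (sx.set num.toNat 1).length → (sx.set num.toNat 1).getD i 0 = 1 :=
          (ones_count _ h01setx).mp hfull
        rcases hinv with hlt | ⟨heq, hsub⟩
        · -- px < py: x cannot return true here (px+1 ≤ py < k); it recurses afresh
          have hnkp : ¬ (k ≤ px + 1) := by omega
          rw [if_neg hnkp] at H
          have H' : canDoLoop x k rest (px + 1) (List.replicate x.toNat 0)
              (x - ((List.replicate x.toNat (0:Int)).count 1 : Int)) = true := by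
            simpa [count_replicate_zero] using H
          -- y-side: take whatever step y takes
          by_cases hMy : 0 ≤ num ∧ num < y ∧ sy.getD num.toNat 0 = 0
          · rw [if_pos hMy]
            obtain ⟨-, hnumy, hseeny⟩ := hMy
            have hny : num.toNat < sy.length := by omega
            have hcsety : (sy.set num.toNat 1).count 1 = sy.count 1 + 1 :=
              count_one_set _ _ hny hseeny
            by_cases hcy : y - (sy.count 1 : Int) - 1 = 0
            · rw [if_pos hcy]
              by_cases hkp : k ≤ py + 1
              · rw [if_pos hkp]
              · rw [if_neg hkp]
                have := ih (px + 1) (py + 1) (List.replicate x.toNat 0)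
                  (List.replicate y.toNat 0) (by simp) (by simp)
                  (fun e he => Or.inl (List.eq_of_mem_replicate he))
                  (fun e he => Or.inl (List.eq_of_mem_replicate he))
                  (by omega)
                  (by
                    rcases lt_or_eq_of_le (show px + 1 ≤ py + 1 by omega) with h | h
                    · exact Or.inl h
                    · exact Or.inr ⟨h, fun i _ hg => by
                        rw [getD_replicate_zero] at hg; exact absurd hg (by norm_num)⟩)
                  H'
                simpa [count_replicate_zero] using this
            · rw [if_neg hcy]
              have := ih (px + 1) py (List.replicate x.toNat 0) (sy.set num.toNat 1)
                (by simp) (by rw [List.length_set]; exact hly)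
                (fun e he => Or.inl (List.eq_of_mem_replicate he))
                (by
                  intro e he
                  rcases List.mem_or_eq_of_mem_set he with h | h
                  · exact h01y e h
                  · exact Or.inr h)
                hpyk
                (by
                  rcases lt_or_eq_of_le (show px + 1 ≤ py by omega) with h | h
                  · exact Or.inl h
                  · exact Or.inr ⟨h, fun i _ hg => by
                      rw [getD_replicate_zero] at hg; exact absurd hg (by norm_num)⟩)
                H'
              have harith : y - ((sy.set num.toNat 1).count 1 : Int) =
                  y - (sy.count 1 : Int) - 1 := by rw [hcsety]; push_cast; ring
              rw [harith] at this
              exact this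
          · rw [if_neg hMy]
            by_cases hcy' : y - (sy.count 1 : Int) = 0
            · rw [if_pos hcy']
              by_cases hkp : k ≤ py + 1
              · rw [if_pos hkp]
              · rw [if_neg hkp]
                have := ih (px + 1) (py + 1) (List.replicate x.toNat 0)
                  (List.replicate y.toNat 0) (by simp) (by simp)
                  (fun e he => Or.inl (List.eq_of_mem_replicate he))
                  (fun e he => Or.inl (List.eq_of_mem_replicate he))
                  (by omega)
                  (by
                    rcases lt_or_eq_of_le (show px + 1 ≤ py + 1 by omega) with h | h
                    · exact Or.inl h
                    · exact Or.inr ⟨h, fun i _ hg => by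
                        rw [getD_replicate_zero] at hg; exact absurd hg (by norm_num)⟩)
                  H'
                simpa [count_replicate_zero] using this
            · rw [if_neg hcy']
              have := ih (px + 1) py (List.replicate x.toNat 0) sy
                (by simp) hly
                (fun e he => Or.inl (List.eq_of_mem_replicate he))
                h01y hpyk
                (by
                  rcases lt_or_eq_of_le (show px + 1 ≤ py by omega) with h | h
                  · exact Or.inl h
                  · exact Or.inr ⟨h, fun i _ hg => by
                      rw [getD_replicate_zero] at hg; exact absurd hg (by norm_num)⟩)
                H'
              exact this
        · -- px = py: the y-run is forced to complete as well
          subst heq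
          have hkey : ∀ i, i < y.toNat → i ≠ num.toNat → sy.getD i 0 = 1 := by
            intro i hi hne
            have h1 : (sx.set num.toNat 1).getD i 0 = 1 :=
              hallx i (by rw [List.length_set]; omega)
            rw [getD_set_eval, if_neg (by tauto)] at h1
            exact hsub i hi h1
          by_cases hMy : 0 ≤ num ∧ num < y ∧ sy.getD num.toNat 0 = 0
          · obtain ⟨-, hnumy, hseeny⟩ := hMy
            have hny : num.toNat < sy.length := by omega
            have hcsety : (sy.set num.toNat 1).count 1 = sy.count 1 + 1 :=
              count_one_set _ _ hny hseeny
            have hallsety : ∀ i, i < (sy.set num.toNat 1).length →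
                (sy.set num.toNat 1).getD i 0 = 1 := by
              intro i hi
              rw [List.length_set] at hi
              rw [getD_set_eval]
              by_cases hni : num.toNat = i
              · rw [if_pos ⟨hni, hny⟩]
              · rw [if_neg (by tauto)]
                exact hkey i (by omega) (fun h => hni h.symm)
            have hcounty : (sy.set num.toNat 1).count 1 = (sy.set num.toNat 1).length := by
              apply (ones_count _ (by
                intro e he
                rcases List.mem_or_eq_of_mem_set he with h | h
                · exact h01y e h
                · exact Or.inr h)).mpr hallsety
            have hcy : y - (sy.count 1 : Int) - 1 = 0 := by
              rw [List.length_set] at hcounty; omega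
            rw [if_pos ⟨hnum0, hnumy, hseeny⟩, if_pos hcy]
            by_cases hkp : k ≤ px + 1
            · rw [if_pos hkp]
            · rw [if_neg hkp] at H ⊢
              have H' : canDoLoop x k rest (px + 1) (List.replicate x.toNat 0)
                  (x - ((List.replicate x.toNat (0:Int)).count 1 : Int)) = true := by
                simpa [count_replicate_zero] using H
              have := ih (px + 1) (px + 1) (List.replicate x.toNat 0)
                (List.replicate y.toNat 0) (by simp) (by simp)
                (fun e he => Or.inl (List.eq_of_mem_replicate he))
                (fun e he => Or.inl (List.eq_of_mem_replicate he))
                (by omega)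
                (Or.inr ⟨rfl, fun i _ hg => by
                  rw [getD_replicate_zero] at hg; exact absurd hg (by norm_num)⟩)
                H'
              simpa [count_replicate_zero] using this
          · -- y does not mark, yet is already full on [0, y)
            have hally' : ∀ i, i < sy.length → sy.getD i 0 = 1 := by
              intro i hi
              rw [hly] at hi
              by_cases hni : i = num.toNat
              · subst hni
                have hiy : num.toNat < y.toNat := hi
                have hnumy : num < y := by omega
                have hne0 : sy.getD num.toNat 0 ≠ 0 := by
                  intro h0; exact hMy ⟨hnum0, hnumy, h0⟩
                have hm : sy.getD num.toNat 0 ∈ sy := by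
                  rw [List.getD_eq_getElem sy 0 (by omega)]
                  exact List.getElem_mem _
                rcases h01y _ hm with h | h
                · exact absurd h hne0
                · exact h
              · exact hkey i hi hni
            have hcounty : sy.count 1 = sy.length := (ones_count _ h01y).mpr hally'
            have hcy : y - (sy.count 1 : Int) = 0 := by omega
            rw [if_neg hMy, if_pos hcy]
            by_cases hkp : k ≤ px + 1
            · rw [if_pos hkp]
            · rw [if_neg hkp] at H ⊢
              have H' : canDoLoop x k rest (px + 1) (List.replicate x.toNat 0)
                  (x - ((List.replicate x.toNat (0:Int)).count 1 : Int)) = true := by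
                simpa [count_replicate_zero] using H
              have := ih (px + 1) (px + 1) (List.replicate x.toNat 0)
                (List.replicate y.toNat 0) (by simp) (by simp)
                (fun e he => Or.inl (List.eq_of_mem_replicate he))
                (fun e he => Or.inl (List.eq_of_mem_replicate he))
                (by omega)
                (Or.inr ⟨rfl, fun i _ hg => by
                  rw [getD_replicate_zero] at hg; exact absurd hg (by norm_num)⟩)
                H'
              simpa [count_replicate_zero] using this
      · -- x-run marks but does not complete
        rw [if_neg hcx0] at H
        have H' : canDoLoop x k rest px (sx.set num.toNat 1)
            (x - ((sx.set num.toNat 1).count 1 : Int)) = true := by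
          have harith : x - ((sx.set num.toNat 1).count 1 : Int) =
              x - (sx.count 1 : Int) - 1 := by rw [hcset]; push_cast; ring
          rw [harith]
          exact H
        have hpxle : px ≤ py := by rcases hinv with h | ⟨h, -⟩ <;> omega
        by_cases hMy : 0 ≤ num ∧ num < y ∧ sy.getD num.toNat 0 = 0
        · obtain ⟨-, hnumy, hseeny⟩ := hMy
          have hny : num.toNat < sy.length := by omega
          have hcsety : (sy.set num.toNat 1).count 1 = sy.count 1 + 1 :=
            count_one_set _ _ hny hseeny
          rw [if_pos ⟨hnum0, hnumy, hseeny⟩]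
          by_cases hcy : y - (sy.count 1 : Int) - 1 = 0
          · rw [if_pos hcy]
            by_cases hkp : k ≤ py + 1
            · rw [if_pos hkp]
            · rw [if_neg hkp]
              have := ih px (py + 1) (sx.set num.toNat 1) (List.replicate y.toNat 0)
                (by rw [List.length_set]; exact hlx) (by simp)
                h01setx
                (fun e he => Or.inl (List.eq_of_mem_replicate he))
                (by omega)
                (Or.inl (by omega))
                H'
              simpa [count_replicate_zero] using this
          · rw [if_neg hcy]
            have := ih px py (sx.set num.toNat 1) (sy.set num.toNat 1)
              (by rw [List.length_set]; exact hlx) (by rw [List.length_set]; exact hly)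
              h01setx
              (by
                intro e he
                rcases List.mem_or_eq_of_mem_set he with h | h
                · exact h01y e h
                · exact Or.inr h)
              hpyk
              (by
                rcases hinv with h | ⟨heq, hsub⟩
                · exact Or.inl h
                · refine Or.inr ⟨heq, ?_⟩
                  intro i hi hg
                  by_cases hni : num.toNat = i
                  · subst hni
                    rw [getD_set_eval, if_pos ⟨rfl, hny⟩]
                  · rw [getD_set_eval, if_neg (by tauto)] at hg
                    exact getD_set_one _ _ _ (hsub i hi hg))
              H'
            have harith : y - ((sy.set num.toNat 1).count 1 : Int) =
                y - (sy.count 1 : Int) - 1 := by rw [hcsety]; push_cast; ring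
            rw [harith] at this
            exact this
        · rw [if_neg hMy]
          by_cases hcy' : y - (sy.count 1 : Int) = 0
          · rw [if_pos hcy']
            by_cases hkp : k ≤ py + 1
            · rw [if_pos hkp]
            · rw [if_neg hkp]
              have := ih px (py + 1) (sx.set num.toNat 1) (List.replicate y.toNat 0)
                (by rw [List.length_set]; exact hlx) (by simp)
                h01setx
                (fun e he => Or.inl (List.eq_of_mem_replicate he))
                (by omega)
                (Or.inl (by omega))
                H'
              simpa [count_replicate_zero] using this
          · rw [if_neg hcy']
            have := ih px py (sx.set num.toNat 1) sy
              (by rw [List.length_set]; exact hlx) hly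
              h01setx h01y hpyk
              (by
                rcases hinv with h | ⟨heq, hsub⟩
                · exact Or.inl h
                · refine Or.inr ⟨heq, ?_⟩
                  intro i hi hg
                  by_cases hni : num.toNat = i
                  · subst hni
                    -- y sees num (< y) unmarked? no: ¬hMy forces sy[num] ≠ 0, i.e. = 1
                    have hnumy : num < y := by omega
                    have hne0 : sy.getD num.toNat 0 ≠ 0 := by
                      intro h0; exact hMy ⟨hnum0, hnumy, h0⟩
                    have hm : sy.getD num.toNat 0 ∈ sy := by
                      rw [List.getD_eq_getElem sy 0 (by omega)]
                      exact List.getElem_mem _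
                    rcases h01y _ hm with h | h
                    · exact absurd h hne0
                    · exact h
                  · rw [getD_set_eval, if_neg (by tauto)] at hg
                    exact hsub i hi hg)
              H'
            exact this
    · -- x-run does not mark this element
      rw [if_neg hMx] at H
      by_cases hcx0 : x - (sx.count 1 : Int) = 0
      · -- x-run completes (seen already full)
        rw [if_pos hcx0] at H
        have hfullx : sx.count 1 = sx.length := by omega
        have hallx : ∀ i, i < sx.length → sx.getD i 0 = 1 := (ones_count _ h01x).mp hfullx
        rcases hinv with hlt | ⟨heq, hsub⟩
        · have hnkp : ¬ (k ≤ px + 1) := by omega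
          rw [if_neg hnkp] at H
          have H' : canDoLoop x k rest (px + 1) (List.replicate x.toNat 0)
              (x - ((List.replicate x.toNat (0:Int)).count 1 : Int)) = true := by
            simpa [count_replicate_zero] using H
          by_cases hMy : 0 ≤ num ∧ num < y ∧ sy.getD num.toNat 0 = 0
          · rw [if_pos hMy]
            obtain ⟨-, hnumy, hseeny⟩ := hMy
            have hny : num.toNat < sy.length := by omega
            have hcsety : (sy.set num.toNat 1).count 1 = sy.count 1 + 1 :=
              count_one_set _ _ hny hseeny
            by_cases hcy : y - (sy.count 1 : Int) - 1 = 0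
            · rw [if_pos hcy]
              by_cases hkp : k ≤ py + 1
              · rw [if_pos hkp]
              · rw [if_neg hkp]
                have := ih (px + 1) (py + 1) (List.replicate x.toNat 0)
                  (List.replicate y.toNat 0) (by simp) (by simp)
                  (fun e he => Or.inl (List.eq_of_mem_replicate he))
                  (fun e he => Or.inl (List.eq_of_mem_replicate he))
                  (by omega)
                  (by
                    rcases lt_or_eq_of_le (show px + 1 ≤ py + 1 by omega) with h | h
                    · exact Or.inl h
                    · exact Or.inr ⟨h, fun i _ hg => by
                        rw [getD_replicate_zero] at hg; exact absurd hg (by norm_num)⟩)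
                  H'
                simpa [count_replicate_zero] using this
            · rw [if_neg hcy]
              have := ih (px + 1) py (List.replicate x.toNat 0) (sy.set num.toNat 1)
                (by simp) (by rw [List.length_set]; exact hly)
                (fun e he => Or.inl (List.eq_of_mem_replicate he))
                (by
                  intro e he
                  rcases List.mem_or_eq_of_mem_set he with h | h
                  · exact h01y e h
                  · exact Or.inr h)
                hpyk
                (by
                  rcases lt_or_eq_of_le (show px + 1 ≤ py by omega) with h | h
                  · exact Or.inl h
                  · exact Or.inr ⟨h, fun i _ hg => by
                      rw [getD_replicate_zero] at hg; exact absurd hg (by norm_num)⟩)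
                H'
              have harith : y - ((sy.set num.toNat 1).count 1 : Int) =
                  y - (sy.count 1 : Int) - 1 := by rw [hcsety]; push_cast; ring
              rw [harith] at this
              exact this
          · rw [if_neg hMy]
            by_cases hcy' : y - (sy.count 1 : Int) = 0
            · rw [if_pos hcy']
              by_cases hkp : k ≤ py + 1
              · rw [if_pos hkp]
              · rw [if_neg hkp]
                have := ih (px + 1) (py + 1) (List.replicate x.toNat 0)
                  (List.replicate y.toNat 0) (by simp) (by simp)
                  (fun e he => Or.inl (List.eq_of_mem_replicate he))
                  (fun e he => Or.inl (List.eq_of_mem_replicate he))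
                  (by omega)
                  (by
                    rcases lt_or_eq_of_le (show px + 1 ≤ py + 1 by omega) with h | h
                    · exact Or.inl h
                    · exact Or.inr ⟨h, fun i _ hg => by
                        rw [getD_replicate_zero] at hg; exact absurd hg (by norm_num)⟩)
                  H'
                simpa [count_replicate_zero] using this
            · rw [if_neg hcy']
              have := ih (px + 1) py (List.replicate x.toNat 0) sy
                (by simp) hly
                (fun e he => Or.inl (List.eq_of_mem_replicate he))
                h01y hpyk
                (by
                  rcases lt_or_eq_of_le (show px + 1 ≤ py by omega) with h | h
                  · exact Or.inl h
                  · exact Or.inr ⟨h, fun i _ hg => by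
                      rw [getD_replicate_zero] at hg; exact absurd hg (by norm_num)⟩)
                H'
              exact this
        · -- px = py: sy is full on [0, y) as well, and y cannot mark
          subst heq
          have hally' : ∀ i, i < sy.length → sy.getD i 0 = 1 := by
            intro i hi
            rw [hly] at hi
            exact hsub i hi (hallx i (by omega))
          have hMy : ¬ (0 ≤ num ∧ num < y ∧ sy.getD num.toNat 0 = 0) := by
            rintro ⟨h0, h1, h2⟩
            have : sy.getD num.toNat 0 = 1 := hally' num.toNat (by omega)
            omega
          have hcounty : sy.count 1 = sy.length := (ones_count _ h01y).mpr hally'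
          have hcy : y - (sy.count 1 : Int) = 0 := by omega
          rw [if_neg hMy, if_pos hcy]
          by_cases hkp : k ≤ px + 1
          · rw [if_pos hkp]
          · rw [if_neg hkp] at H ⊢
            have H' : canDoLoop x k rest (px + 1) (List.replicate x.toNat 0)
                (x - ((List.replicate x.toNat (0:Int)).count 1 : Int)) = true := by
              simpa [count_replicate_zero] using H
            have := ih (px + 1) (px + 1) (List.replicate x.toNat 0)
              (List.replicate y.toNat 0) (by simp) (by simp)
              (fun e he => Or.inl (List.eq_of_mem_replicate he))
              (fun e he => Or.inl (List.eq_of_mem_replicate he))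
              (by omega)
              (Or.inr ⟨rfl, fun i _ hg => by
                rw [getD_replicate_zero] at hg; exact absurd hg (by norm_num)⟩)
              H'
            simpa [count_replicate_zero] using this
      · -- x-run just moves on
        rw [if_neg hcx0] at H
        have hpxle : px ≤ py := by rcases hinv with h | ⟨h, -⟩ <;> omega
        by_cases hMy : 0 ≤ num ∧ num < y ∧ sy.getD num.toNat 0 = 0
        · rw [if_pos hMy]
          obtain ⟨hnum0, hnumy, hseeny⟩ := hMy
          have hny : num.toNat < sy.length := by omega
          have hcsety : (sy.set num.toNat 1).count 1 = sy.count 1 + 1 :=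
            count_one_set _ _ hny hseeny
          by_cases hcy : y - (sy.count 1 : Int) - 1 = 0
          · rw [if_pos hcy]
            by_cases hkp : k ≤ py + 1
            · rw [if_pos hkp]
            · rw [if_neg hkp]
              have := ih px (py + 1) sx (List.replicate y.toNat 0)
                hlx (by simp) h01x
                (fun e he => Or.inl (List.eq_of_mem_replicate he))
                (by omega)
                (Or.inl (by omega))
                H
              simpa [count_replicate_zero] using this
          · rw [if_neg hcy]
            have := ih px py sx (sy.set num.toNat 1)
              hlx (by rw [List.length_set]; exact hly)
              h01x
              (by
                intro e he
                rcases List.mem_or_eq_of_mem_set he with h | h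
                · exact h01y e h
                · exact Or.inr h)
              hpyk
              (by
                rcases hinv with h | ⟨heq, hsub⟩
                · exact Or.inl h
                · exact Or.inr ⟨heq, fun i hi hg => getD_set_one _ _ _ (hsub i hi hg)⟩)
              H
            have harith : y - ((sy.set num.toNat 1).count 1 : Int) =
                y - (sy.count 1 : Int) - 1 := by rw [hcsety]; push_cast; ring
            rw [harith] at this
            exact this
        · rw [if_neg hMy]
          by_cases hcy' : y - (sy.count 1 : Int) = 0
          · rw [if_pos hcy']
            by_cases hkp : k ≤ py + 1
            · rw [if_pos hkp]
            · rw [if_neg hkp]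
              have := ih px (py + 1) sx (List.replicate y.toNat 0)
                hlx (by simp) h01x
                (fun e he => Or.inl (List.eq_of_mem_replicate he))
                (by omega)
                (Or.inl (by omega))
                H
              simpa [count_replicate_zero] using this
          · rw [if_neg hcy']
            exact ih px py sx sy hlx hly h01x h01y hpyk hinv H

lemma canDo_zero (arr : List Int) (k : Int) : canDo 0 arr k = true := by
  simp [canDo]

lemma canDo_mono (arr : List Int) (k x y : Int) (hk : 1 ≤ k) (hy : 0 ≤ y) (hyx : y ≤ x)
    (h : canDo x arr k = true) : canDo y arr k = true := by
  rcases eq_or_lt_of_le hy with h0 | h0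
  · rw [← h0]; exact canDo_zero arr k
  · have hy1 : 1 ≤ y := h0
    have hx1 : 1 ≤ x := le_trans hy1 hyx
    rw [canDo, if_neg (by omega)] at h ⊢
    have h' : canDoLoop x k arr 0 (List.replicate x.toNat 0)
        (x - ((List.replicate x.toNat (0:Int)).count 1 : Int)) = true := by
      simpa [count_replicate_zero] using h
    have := monoLoop x y k hy1 hyx arr 0 0
      (List.replicate x.toNat 0) (List.replicate y.toNat 0)
      (by simp) (by simp)
      (fun e he => Or.inl (List.eq_of_mem_replicate he))
      (fun e he => Or.inl (List.eq_of_mem_replicate he))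
      (by omega)
      (Or.inr ⟨rfl, fun i _ hg => by
        rw [getD_replicate_zero] at hg; exact absurd hg (by norm_num)⟩)
      h'
    simpa [count_replicate_zero] using this

lemma ptrGo_ge (freq : PySem.Dict Int Int) (k : Int) :
    ∀ (n : Nat) (p : Int), p ≤ ptrGo freq k n p := by
  intro n
  induction n with
  | zero => intro p; simp [ptrGo]
  | succ n ih =>
    intro p
    rw [ptrGo]
    split
    · exact le_trans (by omega) (ih (p + 1))
    · exact le_rfl

lemma bs_spec (arr : List Int) (k H0 : Int) (hk : 1 ≤ k) :
    ∀ (n : Nat) (lo hi : Int), 0 ≤ lo → lo ≤ hi → hi ≤ H0 → (hi - lo).toNat ≤ n →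
      (∀ i, 0 ≤ i → i < lo → canDo i arr k = true) →
      (∀ j, hi ≤ j → j < H0 → canDo j arr k = false) →
      0 ≤ bsGo arr k n lo hi ∧ bsGo arr k n lo hi ≤ H0 ∧
      (∀ i, 0 ≤ i → i < bsGo arr k n lo hi → canDo i arr k = true) ∧
      (∀ j, bsGo arr k n lo hi ≤ j → j < H0 → canDo j arr k = false) := by
  intro n
  induction n with
  | zero =>
    intro lo hi h0 hlh hhH hf hlo hhi
    have : lo = hi := by omega
    rw [bsGo]
    exact ⟨h0, by omega, hlo, by rw [this]; exact hhi⟩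
  | succ n ih =>
    intro lo hi h0 hlh hhH hf hlo hhi
    by_cases hlt : lo < hi
    · have hmid := PySem.Int.floordiv_two_mid_bounds hlh
      obtain ⟨hm1, hm2⟩ := hmid
      have hmlt : PySem.Int.floordiv (lo + hi) 2 < hi := by
        rw [PySem.Int.floordiv_lt_iff_lt_mul (by norm_num)]
        omega
      by_cases hc : canDo (PySem.Int.floordiv (lo + hi) 2) arr k = true
      · rw [bsGo, if_pos hlt, if_pos hc]
        apply ih (PySem.Int.floordiv (lo + hi) 2 + 1) hi (by omega) (by omega) hhH
          (by omega) ?_ hhi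
        intro i hi0 hiu
        exact canDo_mono arr k (PySem.Int.floordiv (lo + hi) 2) i hk hi0 (by omega) hc
      · rw [bsGo, if_pos hlt, if_neg hc]
        apply ih lo (PySem.Int.floordiv (lo + hi) 2) h0 (by omega) (by omega) (by omega)
          hlo ?_
        intro j hju hjH
        cases hcj : canDo j arr k
        · rfl
        · exact absurd (canDo_mono arr k j (PySem.Int.floordiv (lo + hi) 2) hk
            (by omega) hju hcj) hc
    · have : lo = hi := by omega
      rw [bsGo, if_neg hlt]
      exact ⟨h0, by omega, hlo, by rw [this]; exact hhi⟩

-- ===== B-side lemmas =====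

-- parts only grows along cpLoop
lemma cpLoop_ge (x : Int) : ∀ (l : List Int) (parts : Int) (cur : PySem.Set Int),
    parts ≤ cpLoop x l parts cur := by
  intro l
  induction l with
  | nil => intro parts cur; simp [cpLoop]
  | cons num rest ih =>
    intro parts cur
    rw [cpLoop]
    split
    · split
      · exact le_trans (by omega) (ih (parts + 1) _)
      · exact ih parts _
    · exact ih parts cur

-- a nodup list of ints inside [0, x) has at most x elements
lemma length_le_of_nodup_bounds (cur : List Int) (x : Int) (hx : 0 ≤ x)
    (hn : cur.Nodup) (hb : ∀ e ∈ cur, 0 ≤ e ∧ e < x) : (cur.length : Int) ≤ x := by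
  have hsub : cur.toFinset ⊆ Finset.Ico (0:Int) x := by
    intro e he
    rw [List.mem_toFinset] at he
    exact Finset.mem_Ico.mpr (hb e he)
  have := Finset.card_le_card hsub
  rw [List.toFinset_card_of_nodup hn, Int.card_Ico] at this
  omega

-- a full nodup list inside [0, x) contains every value of [0, x)
lemma full_mem (cur : List Int) (x v : Int)
    (hn : cur.Nodup) (hb : ∀ e ∈ cur, 0 ≤ e ∧ e < x) (hl : (cur.length : Int) = x)
    (hv0 : 0 ≤ v) (hvx : v < x) : v ∈ cur := by
  have hsub : cur.toFinset ⊆ Finset.Ico (0:Int) x := by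
    intro e he
    rw [List.mem_toFinset] at he
    exact Finset.mem_Ico.mpr (hb e he)
  have hcard : (Finset.Ico (0:Int) x).card ≤ cur.toFinset.card := by
    rw [List.toFinset_card_of_nodup hn, Int.card_Ico]; omega
  have heq := Finset.eq_of_subset_of_card_le hsub hcard
  have : v ∈ cur.toFinset := by
    rw [heq]; exact Finset.mem_Ico.mpr ⟨hv0, hvx⟩
  simpa using this

lemma set_add_nonmem (cur : List Int) (num : Int) (h : ¬ num ∈ cur) :
    PySem.Set.add cur num = cur ++ [num] := by
  simp [PySem.Set.add, PySem.Set.contains, h]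

-- bridge: A's early-return loop decides exactly «k ≤ B's part count»
lemma bridge_loop (x k : Int) (hx : 1 ≤ x) (hk : 1 ≤ k) :
    ∀ (l : List Int) (parts : Int) (seen cur : List Int),
      seen.length = x.toNat → (∀ e ∈ seen, e = 0 ∨ e = 1) →
      cur.Nodup → (∀ e ∈ cur, 0 ≤ e ∧ e < x) →
      (∀ i : Nat, i < x.toNat → (seen.getD i 0 = 1 ↔ (i : Int) ∈ cur)) →
      (cur.length : Int) = (seen.count 1 : Int) →
      (seen.count 1 : Int) < x →
      parts < k →
      canDoLoop x k l parts seen (x - (seen.count 1 : Int)) =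
        decide (k ≤ cpLoop x l parts cur) := by
  intro l
  induction l with
  | nil =>
    intro parts seen cur _ _ _ _ _ _ _ hpk
    simp only [canDoLoop, cpLoop]
    rw [eq_comm, decide_eq_false_iff_not]
    omega
  | cons num rest ih =>
    intro parts seen cur hlen h01 hnd hbd hiff hcl hclt hpk
    simp only [canDoLoop]
    by_cases hG : 0 ≤ num ∧ num < x ∧ seen.getD num.toNat 0 = 0
    · obtain ⟨h0, h1, h2⟩ := hG
      have hnt : num.toNat < seen.length := by omega
      have hntc : ((num.toNat : Int)) = num := by omega
      have hnc : ¬ num ∈ cur := by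
        intro hm
        have := (hiff num.toNat (by omega)).mpr (by rwa [hntc])
        omega
      rw [if_pos (show 0 ≤ num ∧ num < x ∧ seen.getD num.toNat 0 = 0 from ⟨h0, h1, h2⟩)]
      have hadd : PySem.Set.add cur num = cur ++ [num] := set_add_nonmem cur num hnc
      have hlen' : ((PySem.Set.add cur num).length : Int) = (seen.count 1 : Int) + 1 := by
        rw [hadd]; push_cast [List.length_append, List.length_singleton]; omega
      have hcset : (seen.set num.toNat 1).count 1 = seen.count 1 + 1 :=
        count_one_set _ _ hnt h2
      have hnd' : (PySem.Set.add cur num).Nodup := by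
        rw [hadd]
        rw [List.nodup_append]
        refine ⟨hnd, List.nodup_singleton _, ?_⟩
        intro a ha b hb heq
        rw [heq, List.eq_of_mem_singleton hb] at ha
        exact hnc ha
      have hbd' : ∀ e ∈ PySem.Set.add cur num, 0 ≤ e ∧ e < x := by
        rw [hadd]
        intro e he
        rcases (by simpa using he : e ∈ cur ∨ e = num) with h | h
        · exact hbd e h
        · subst h; exact ⟨h0, h1⟩
      by_cases hfull : x - (seen.count 1 : Int) - 1 = 0
      · have hR : cpLoop x (num :: rest) parts cur = cpLoop x rest (parts + 1) PySem.Set.empty := by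
          rw [cpLoop, if_pos (show 0 ≤ num ∧ num < x ∧ ¬ num ∈ cur from ⟨h0, h1, hnc⟩),
            if_pos (show ((PySem.Set.add cur num).length : Int) = x by omega)]
        simp only [hR]
        rw [if_pos hfull]
        by_cases hkp : k ≤ parts + 1
        · rw [if_pos hkp]
          have := cpLoop_ge x rest (parts + 1) PySem.Set.empty
          rw [eq_comm, decide_eq_true_eq]
          omega
        · rw [if_neg hkp]
          have := ih (parts + 1) (List.replicate x.toNat 0) PySem.Set.empty
            (by simp)
            (fun e he => Or.inl (List.eq_of_mem_replicate he))
            List.nodup_nil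
            (by intro e he; simp [PySem.Set.empty] at he)
            (by
              intro i hi
              rw [getD_replicate_zero]
              simp [PySem.Set.empty])
            (by simp [PySem.Set.empty, count_replicate_zero])
            (by rw [count_replicate_zero]; omega)
            (by omega)
          simpa [count_replicate_zero] using this
      · have hle : ((PySem.Set.add cur num).length : Int) ≤ x :=
          length_le_of_nodup_bounds _ x (by omega) hnd' hbd'
        have hR : cpLoop x (num :: rest) parts cur = cpLoop x rest parts (PySem.Set.add cur num) := by
          rw [cpLoop, if_pos (show 0 ≤ num ∧ num < x ∧ ¬ num ∈ cur from ⟨h0, h1, hnc⟩),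
            if_neg (show ¬ ((PySem.Set.add cur num).length : Int) = x by omega)]
        simp only [hR]
        rw [if_neg hfull]
        have := ih parts (seen.set num.toNat 1) (PySem.Set.add cur num)
          (by rw [List.length_set]; exact hlen)
          (by
            intro e he
            rcases List.mem_or_eq_of_mem_set he with h | h
            · exact h01 e h
            · exact Or.inr h)
          hnd' hbd'
          (by
            intro i hi
            rw [getD_set_eval, hadd]
            by_cases hni : num.toNat = i
            · subst hni
              rw [if_pos ⟨rfl, hnt⟩]
              simp [hntc]
            · rw [if_neg (by tauto)]
              rw [List.mem_append]
              constructor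
              · intro h; exact Or.inl ((hiff i hi).mp h)
              · intro h
                rcases h with h | h
                · exact (hiff i hi).mpr h
                · exfalso
                  apply hni
                  have : (i : Int) = num := by simpa using h
                  omega)
          (by rw [hcset]; push_cast; omega)
          (by rw [hcset]; push_cast; omega)
          hpk
        have harith : x - (seen.count 1 : Int) - 1 =
            x - ((seen.set num.toNat 1).count 1 : Int) := by
          rw [hcset]; push_cast; ring
        rw [harith]
        exact this
    · have hGb : ¬ (0 ≤ num ∧ num < x ∧ ¬ num ∈ cur) := by
        rintro ⟨h0, h1, hnm⟩
        apply hG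
        refine ⟨h0, h1, ?_⟩
        have hnt : num.toNat < seen.length := by omega
        have hm : seen.getD num.toNat 0 ∈ seen := by
          rw [List.getD_eq_getElem seen 0 hnt]
          exact List.getElem_mem _
        rcases h01 _ hm with h | h
        · exact h
        · exfalso
          apply hnm
          have := (hiff num.toNat (by omega)).mp h
          rwa [(by omega : ((num.toNat : Int)) = num)] at this
      have hR : cpLoop x (num :: rest) parts cur = cpLoop x rest parts cur := by
        rw [cpLoop, if_neg hGb]
      simp only [hR]
      rw [if_neg hG, if_neg (show ¬ x - (seen.count 1 : Int) = 0 by omega)]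
      exact ih parts seen cur hlen h01 hnd hbd hiff hcl hclt hpk

lemma canDo_eq (arr : List Int) (k x : Int) (hk : 1 ≤ k) (hx : 0 ≤ x) :
    canDo x arr k = canDoB x arr k := by
  rcases eq_or_lt_of_le hx with h0 | h0
  · rw [← h0]; simp [canDo, canDoB]
  · have hx1 : 1 ≤ x := h0
    rw [canDo, canDoB, if_neg (by omega), if_neg (by omega)]
    have := bridge_loop x k hx1 hk arr 0 (List.replicate x.toNat 0) PySem.Set.empty
      (by simp)
      (fun e he => Or.inl (List.eq_of_mem_replicate he))
      List.nodup_nil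
      (by intro e he; simp [PySem.Set.empty] at he)
      (by
        intro i hi
        rw [getD_replicate_zero]
        simp [PySem.Set.empty])
      (by simp [PySem.Set.empty, count_replicate_zero])
      (by rw [count_replicate_zero]; omega)
      (by omega)
    simpa [count_replicate_zero] using this

-- pigeonhole: x parts of x distinct elements each consume x elements
lemma cpLoop_mul_le (x : Int) (hx : 1 ≤ x) :
    ∀ (l : List Int) (parts : Int) (cur : List Int),
      cur.Nodup → (∀ e ∈ cur, 0 ≤ e ∧ e < x) →
      x * (cpLoop x l parts cur - parts) ≤ (cur.length : Int) + (l.length : Int) := by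
  intro l
  induction l with
  | nil =>
    intro parts cur _ _
    rw [cpLoop]
    have h0 : x * (parts - parts) = 0 := by ring
    rw [h0]
    positivity
  | cons num rest ih =>
    intro parts cur hnd hbd
    rw [cpLoop]
    by_cases hG : 0 ≤ num ∧ num < x ∧ ¬ num ∈ cur
    · obtain ⟨h0, h1, hnc⟩ := hG
      rw [if_pos ⟨h0, h1, hnc⟩]
      have hadd : PySem.Set.add cur num = cur ++ [num] := set_add_nonmem cur num hnc
      have hlen' : ((PySem.Set.add cur num).length : Int) = (cur.length : Int) + 1 := by
        rw [hadd]; push_cast [List.length_append, List.length_singleton]; ring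
      have hnd' : (PySem.Set.add cur num).Nodup := by
        rw [hadd, List.nodup_append]
        refine ⟨hnd, List.nodup_singleton _, ?_⟩
        intro a ha b hb heq
        rw [heq, List.eq_of_mem_singleton hb] at ha
        exact hnc ha
      have hbd' : ∀ e ∈ PySem.Set.add cur num, 0 ≤ e ∧ e < x := by
        rw [hadd]
        intro e he
        rcases (by simpa using he : e ∈ cur ∨ e = num) with h | h
        · exact hbd e h
        · subst h; exact ⟨h0, h1⟩
      by_cases hfull : ((PySem.Set.add cur num).length : Int) = x
      · rw [if_pos hfull]
        have hIH := ih (parts + 1) PySem.Set.empty List.nodup_nil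
          (by intro e he; simp [PySem.Set.empty] at he)
        have hexp : x * (cpLoop x rest (parts + 1) PySem.Set.empty - parts) =
            x * (cpLoop x rest (parts + 1) PySem.Set.empty - (parts + 1)) + x := by ring
        rw [hexp]
        have hempty : ((PySem.Set.empty : PySem.Set Int).length : Int) = 0 := rfl
        rw [hempty] at hIH
        push_cast [List.length_cons]
        linarith
      · rw [if_neg hfull]
        have hIH := ih parts (PySem.Set.add cur num) hnd' hbd'
        rw [hlen'] at hIH
        push_cast [List.length_cons]
        linarith
    · rw [if_neg hG]
      have hIH := ih parts cur hnd hbd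
      push_cast [List.length_cons]
      linarith

-- each completed part consumes one occurrence of every v ∈ [0, x)
lemma cpLoop_le_count (x v : Int) (hx : 1 ≤ x) (hv0 : 0 ≤ v) (hvx : v < x) :
    ∀ (l : List Int) (parts : Int) (cur : List Int),
      cur.Nodup → (∀ e ∈ cur, 0 ≤ e ∧ e < x) →
      cpLoop x l parts cur ≤ parts + (l.count v : Int) + (if v ∈ cur then 1 else 0) := by
  intro l
  induction l with
  | nil =>
    intro parts cur _ _
    rw [cpLoop]
    split <;> simp
  | cons num rest ih =>
    intro parts cur hnd hbd
    rw [cpLoop]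
    by_cases hG : 0 ≤ num ∧ num < x ∧ ¬ num ∈ cur
    · obtain ⟨h0, h1, hnc⟩ := hG
      rw [if_pos ⟨h0, h1, hnc⟩]
      have hadd : PySem.Set.add cur num = cur ++ [num] := set_add_nonmem cur num hnc
      have hnd' : (PySem.Set.add cur num).Nodup := by
        rw [hadd, List.nodup_append]
        refine ⟨hnd, List.nodup_singleton _, ?_⟩
        intro a ha b hb heq
        rw [heq, List.eq_of_mem_singleton hb] at ha
        exact hnc ha
      have hbd' : ∀ e ∈ PySem.Set.add cur num, 0 ≤ e ∧ e < x := by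
        rw [hadd]
        intro e he
        rcases (by simpa using he : e ∈ cur ∨ e = num) with h | h
        · exact hbd e h
        · subst h; exact ⟨h0, h1⟩
      by_cases hfull : ((PySem.Set.add cur num).length : Int) = x
      · rw [if_pos hfull]
        have hvmem : v ∈ PySem.Set.add cur num := full_mem _ x v hnd' hbd' hfull hv0 hvx
        have hIH := ih (parts + 1) PySem.Set.empty List.nodup_nil
          (by intro e he; simp [PySem.Set.empty] at he)
        have hvem : ¬ v ∈ (PySem.Set.empty : PySem.Set Int) := by simp [PySem.Set.empty]
        rw [if_neg hvem] at hIH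
        by_cases hnv : num = v
        · subst hnv
          rw [List.count_cons_self, if_neg hnc]
          push_cast
          omega
        · have hvc : v ∈ cur := by
            rw [hadd] at hvmem
            rcases (by simpa using hvmem : v ∈ cur ∨ v = num) with h | h
            · exact h
            · exact absurd h.symm hnv
          rw [List.count_cons_of_ne hnv, if_pos hvc]
          omega
      · rw [if_neg hfull]
        have hIH := ih parts (PySem.Set.add cur num) hnd' hbd'
        by_cases hnv : num = v
        · subst hnv
          have hvm' : num ∈ PySem.Set.add cur num := by rw [hadd]; simp
          rw [if_pos hvm'] at hIH
          rw [List.count_cons_self, if_neg hnc]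
          push_cast
          omega
        · have hmemiff : (v ∈ PySem.Set.add cur num) ↔ v ∈ cur := by
            rw [hadd]
            simp only [List.mem_append, List.mem_singleton]
            constructor
            · intro h
              rcases h with h | h
              · exact h
              · exact absurd h.symm hnv
            · exact Or.inl
          rw [List.count_cons_of_ne hnv]
          by_cases hvc : v ∈ cur
          · rw [if_pos hvc]
            rw [if_pos (hmemiff.mpr hvc)] at hIH
            omega
          · rw [if_neg hvc]
            rw [if_neg (fun h => hvc (hmemiff.mp h))] at hIH
            omega
    · rw [if_neg hG]
      have hIH := ih parts cur hnd hbd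
      by_cases hnv : num = v
      · subst hnv
        rw [List.count_cons_self]
        push_cast
        omega
      · rw [List.count_cons_of_ne hnv]
        omega

lemma canDo_bound (arr : List Int) (k x : Int) (hk : 1 ≤ k) (hx : 0 ≤ x)
    (h : canDo x arr k = true) : x * k ≤ (arr.length : Int) := by
  rcases eq_or_lt_of_le hx with h0 | h0
  · rw [← h0]; simp
  · have hx1 : 1 ≤ x := h0
    rw [canDo_eq arr k x hk hx, canDoB, if_neg (by omega), decide_eq_true_eq] at h
    have hmul := cpLoop_mul_le x hx1 arr 0 PySem.Set.empty List.nodup_nil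
      (by intro e he; simp [PySem.Set.empty] at he)
    have hempty : ((PySem.Set.empty : PySem.Set Int).length : Int) = 0 := rfl
    rw [hempty] at hmul
    have : x * k ≤ x * cpLoop x arr 0 PySem.Set.empty :=
      mul_le_mul_of_nonneg_left h (by omega)
    linarith

lemma canDo_false_of_count (arr : List Int) (k x p : Int) (hk : 1 ≤ k) (hp0 : 0 ≤ p)
    (hpx : p < x) (hc : (arr.count p : Int) < k) : canDo x arr k = false := by
  rw [canDo_eq arr k x hk (by omega), canDoB, if_neg (by omega),
    decide_eq_false_iff_not]
  intro hcp
  have := cpLoop_le_count x p (by omega) hp0 hpx arr 0 PySem.Set.empty List.nodup_nil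
    (by intro e he; simp [PySem.Set.empty] at he)
  rw [if_neg (by simp [PySem.Set.empty] : ¬ p ∈ (PySem.Set.empty : PySem.Set Int))] at this
  omega

-- the ptr loop really reaches a value whose count is below k
lemma ptrGo_below (arr : List Int) (k : Int) :
    ∀ (fuel : Nat) (p : Int),
      (∃ t, p ≤ t ∧ t < p + (fuel : Int) ∧ (arr.count t : Int) < k) →
      (arr.count (ptrGo (PySem.Dict.counter arr) k fuel p) : Int) < k := by
  intro fuel
  induction fuel with
  | zero =>
    intro p h
    obtain ⟨t, h1, h2, _⟩ := h
    exfalso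
    push_cast at h2
    omega
  | succ n ih =>
    intro p h
    obtain ⟨t, h1, h2, h3⟩ := h
    rw [ptrGo]
    by_cases hc : k ≤ (PySem.Dict.counter arr).getD p 0
    · rw [if_pos hc]
      rw [PySem.Dict.getD_counter] at hc
      apply ih
      refine ⟨t, ?_, ?_, h3⟩
      · rcases eq_or_lt_of_le h1 with h | h
        · exfalso; rw [← h] at h3; omega
        · omega
      · push_cast at h2 ⊢; omega
    · rw [if_neg hc]
      rw [PySem.Dict.getD_counter] at hc
      omega

lemma ptrGo_count (arr : List Int) (k : Int) (hk : 1 ≤ k) :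
    (arr.count (ptrGo (PySem.Dict.counter arr) k (arr.length + 1) 0) : Int) < k := by
  apply ptrGo_below
  by_contra h
  push_neg at h
  have hsub : Finset.Ico (0 : Int) ((arr.length : Int) + 1) ⊆ arr.toFinset := by
    intro t ht
    rw [Finset.mem_Ico] at ht
    have := h t ht.1 (by push_cast; omega)
    rw [List.mem_toFinset]
    exact List.count_pos_iff.mp (by omega)
  have hle := Finset.card_le_card hsub
  rw [Int.card_Ico] at hle
  have h2 := arr.toFinset_card_le
  omega

-- the downward scan returns the boundary r
lemma downGo_spec (arr : List Int) (k r : Int) (hr0 : 0 ≤ r)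
    (htrue : canDoB r arr k = true)
    (hfalse : ∀ j, r < j → canDoB j arr k = false) :
    ∀ (n : Nat) (m : Int), m.toNat ≤ n → 0 ≤ m → r ≤ m →
      downGo arr k (PySem.List.pyRange m 0 (-1)) = r := by
  intro n
  induction n with
  | zero =>
    intro m h1 h2 h3
    have hm : m = 0 := by omega
    subst hm
    rw [PySem.List.pyRange_neg_one_eq_nil le_rfl, downGo]
    omega
  | succ n ih =>
    intro m h1 h2 h3
    rcases eq_or_lt_of_le h2 with h0 | h0
    · rw [← h0]
      rw [PySem.List.pyRange_neg_one_eq_nil le_rfl, downGo]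
      omega
    · rw [PySem.List.pyRange_neg_one_cons h0, downGo]
      by_cases hmr : m = r
      · subst hmr
        rw [if_pos htrue]
      · rw [if_neg (by rw [hfalse m (by omega)]; simp)]
        exact ih (m - 1) (by omega) (by omega) (by omega)

-- ===== VERDICT (by name: the statement is the Claim_ definition above) =====
-- the binary search over [0, ptr+1) and the downward scan from len//k find the same boundary
lemma main_eq (arr : List Int) (k : Int) (hk : 1 ≤ k) :
    bsGo arr k ((ptrGo (PySem.Dict.counter arr) k (arr.length + 1) 0) + 1).toNat 0
        ((ptrGo (PySem.Dict.counter arr) k (arr.length + 1) 0) + 1) - 1 =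
      downGo arr k (PySem.List.pyRange (PySem.Int.floordiv (arr.length : Int) k) 0 (-1)) := by
  set p := ptrGo (PySem.Dict.counter arr) k (arr.length + 1) 0 with hp
  have hp0 : 0 ≤ p := ptrGo_ge _ _ _ 0
  have hpc : (arr.count p : Int) < k := ptrGo_count arr k hk
  obtain ⟨hL0, hLH, hLtrue, hLfalse⟩ := bs_spec arr k (p + 1) hk (p + 1).toNat 0 (p + 1)
    le_rfl (by omega) le_rfl (by omega)
    (by intro i h1 h2; omega) (by intro j h1 h2; omega)
  set L := bsGo arr k (p + 1).toNat 0 (p + 1) with hL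
  have hL1 : 1 ≤ L := by
    by_contra h
    have := hLfalse 0 (by omega) (by omega)
    rw [canDo_zero arr k] at this
    cases this
  have hrtrue : canDo (L - 1) arr k = true := hLtrue (L - 1) (by omega) (by omega)
  have hrfalse : ∀ j, L - 1 < j → canDo j arr k = false := by
    intro j hj
    by_cases hjp : j ≤ p
    · exact hLfalse j (by omega) (by omega)
    · exact canDo_false_of_count arr k j p hk hp0 (by omega) hpc
  have hm0 : 0 ≤ PySem.Int.floordiv (arr.length : Int) k := by
    rw [PySem.Int.le_floordiv_iff_mul_le (by omega)]
    omega
  have hrm : L - 1 ≤ PySem.Int.floordiv (arr.length : Int) k := by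
    rw [PySem.Int.le_floordiv_iff_mul_le (by omega)]
    exact canDo_bound arr k (L - 1) hk (by omega) hrtrue
  have hBtrue : canDoB (L - 1) arr k = true := by
    rw [← canDo_eq arr k (L - 1) hk (by omega)]; exact hrtrue
  have hBfalse : ∀ j, L - 1 < j → canDoB j arr k = false := by
    intro j hj
    rw [← canDo_eq arr k j hk (by omega)]
    exact hrfalse j hj
  have := downGo_spec arr k (L - 1) (by omega) hBtrue hBfalse
    (PySem.Int.floordiv (arr.length : Int) k).toNat
    (PySem.Int.floordiv (arr.length : Int) k) le_rfl hm0 hrm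
  rw [this]

-- ===== VERDICT (by name: the statement is the Claim_ definition above) =====
theorem maxMex_spec : Claim_equal_maxMex := by
  intro arr k _ hpre
  obtain ⟨hk, -⟩ := hpre
  show maxMex arr k = maxMex_alt arr k
  exact main_eq arr k hk
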